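-- pv_equiv track=rewrite | github.com/Shafin-A/AdventOfCode | 2024/Day02/day.py | are_levels_unsafe
-- ===== SOURCE A (Python) =====
-- def is_all_increasing(arr: list[int]):
--     for i in range(1, len(arr)):
--         if arr[i] <= arr[i - 1]:
--             return False
--     return True
--
-- def is_all_decreasing(arr: list[int]):
--     for i in range(1, len(arr)):
--         if arr[i] >= arr[i - 1]:
--             return False
--     return True
--
-- def are_levels_unsafe(levels: list[int]):
--     is_unsafe = True
--
--     if is_all_increasing(levels) or is_all_decreasing(levels):
--         is_unsafe = False
--
--         for i in range(1, len(levels)):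
--             if not is_unsafe:
--                 diff = abs(levels[i] - levels[i - 1])
--                 if not 1 <= diff <= 3:
--                     is_unsafe = True
--
--     return is_unsafe
-- ===== SOURCE B (Python) =====
-- def are_levels_unsafe(levels: list[int]):
--     all_incr = all_decr = all_in_range = True
--     for a, b in zip(levels, levels[1:]):
--         all_incr = all_incr and b > a
--         all_decr = all_decr and b < a
--         all_in_range = all_in_range and 1 <= abs(b - a) <= 3
--     return not ((all_incr or all_decr) and all_in_range)
-- ===== Notes on version B (the rewrite author's own statement) =====
-- stated objective: simpler
-- what changed: Replaces A's three separate index-based scans (two monotonicity helpers plus a flag-guarded diff loop) with one pass over adjacent pairs accumulating three booleans combined at the end.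
import Mathlib
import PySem

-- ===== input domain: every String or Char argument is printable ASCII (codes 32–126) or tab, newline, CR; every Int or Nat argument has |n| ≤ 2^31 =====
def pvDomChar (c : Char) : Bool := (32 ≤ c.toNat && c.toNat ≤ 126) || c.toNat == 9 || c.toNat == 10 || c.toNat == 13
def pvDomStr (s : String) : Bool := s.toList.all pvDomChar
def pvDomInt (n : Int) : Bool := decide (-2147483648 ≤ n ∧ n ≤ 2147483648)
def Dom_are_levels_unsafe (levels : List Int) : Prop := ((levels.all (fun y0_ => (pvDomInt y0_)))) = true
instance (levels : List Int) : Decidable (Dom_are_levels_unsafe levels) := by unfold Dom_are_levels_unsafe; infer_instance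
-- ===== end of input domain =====

-- B replaces A's three separate scans by one pass over adjacent pairs; objective: simpler.

-- ===== PORT A =====
-- for i in range(1, len(arr)): if arr[i] <= arr[i-1]: return False; return True
def isAllIncreasingLoop (arr : List Int) (i : Nat) : Bool :=
  if _h : i < arr.length then
    if arr.getD i 0 ≤ arr.getD (i - 1) 0 then false
    else isAllIncreasingLoop arr (i + 1)
  else true
termination_by arr.length - i

def is_all_increasing (arr : List Int) : Bool := isAllIncreasingLoop arr 1

def isAllDecreasingLoop (arr : List Int) (i : Nat) : Bool :=
  if _h : i < arr.length then
    if arr.getD i 0 ≥ arr.getD (i - 1) 0 then false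
    else isAllDecreasingLoop arr (i + 1)
  else true
termination_by arr.length - i

def is_all_decreasing (arr : List Int) : Bool := isAllDecreasingLoop arr 1

-- the flag-guarded diff loop: for i in range(1,len): if not is_unsafe: … set flag
def diffLoop (levels : List Int) (i : Nat) (is_unsafe : Bool) : Bool :=
  if _h : i < levels.length then
    diffLoop levels (i + 1)
      (if is_unsafe then is_unsafe
       else
         let diff := |levels.getD i 0 - levels.getD (i - 1) 0|
         if ¬ (1 ≤ diff ∧ diff ≤ 3) then true else is_unsafe)
  else is_unsafe
termination_by levels.length - i

def are_levels_unsafe (levels : List Int) : Bool :=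
  let is_unsafe := true
  if is_all_increasing levels || is_all_decreasing levels then
    diffLoop levels 1 false
  else is_unsafe

-- ===== PORT B =====
-- one pass over zip(levels, levels[1:]) accumulating three booleans
def are_levels_unsafe_alt (levels : List Int) : Bool :=
  let s := (levels.zip (PySem.List.slice levels (some 1) none)).foldl
    (fun (s : Bool × Bool × Bool) (p : Int × Int) =>
      (s.1 && decide (p.2 > p.1),
       s.2.1 && decide (p.2 < p.1),
       s.2.2 && decide (1 ≤ |p.2 - p.1| ∧ |p.2 - p.1| ≤ 3)))
    (true, true, true)
  !((s.1 || s.2.1) && s.2.2)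

-- ===== PRECONDITION & SPEC =====
def Spec_are_levels_unsafe (levels : List Int) (out : Bool) : Prop := out = are_levels_unsafe_alt levels
instance (levels : List Int) (out : Bool) : Decidable (Spec_are_levels_unsafe levels out) := by unfold Spec_are_levels_unsafe; infer_instance

-- ===== CLAIM (what is proved, stated in full; the proofs are below) =====
def Claim_equal_are_levels_unsafe : Prop := ∀ (levels : List Int), Dom_are_levels_unsafe levels → Spec_are_levels_unsafe levels (are_levels_unsafe levels)

-- ===== LEMMAS AND PROOFS =====

-- adjacent-pair predicates used as the common reference point of both ports
def pairsInc : List Int → Bool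
  | a :: b :: t => decide (a < b) && pairsInc (b :: t)
  | _ => true

def pairsDec : List Int → Bool
  | a :: b :: t => decide (b < a) && pairsDec (b :: t)
  | _ => true

def pairsOk : List Int → Bool
  | a :: b :: t => decide (1 ≤ |b - a| ∧ |b - a| ≤ 3) && pairsOk (b :: t)
  | _ => true

theorem pairs_short (l : List Int) (h : l.length ≤ 1) :
    pairsInc l = true ∧ pairsDec l = true ∧ pairsOk l = true := by
  match l with
  | [] => exact ⟨rfl, rfl, rfl⟩
  | [a] => exact ⟨rfl, rfl, rfl⟩
  | a :: b :: t => simp at h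

theorem drop_two_cons (arr : List Int) (i : Nat) (h1 : 1 ≤ i) (h : i < arr.length) :
    arr.drop (i - 1) = arr.getD (i - 1) 0 :: arr.getD i 0 :: arr.drop (i + 1) := by
  have h0 : i - 1 < arr.length := lt_of_le_of_lt (Nat.sub_le _ _) h
  rw [List.drop_eq_getElem_cons h0, List.getD_eq_getElem _ _ h0]
  have : i - 1 + 1 = i := Nat.sub_add_cancel h1
  rw [this, List.drop_eq_getElem_cons h, List.getD_eq_getElem _ _ h]

theorem incLoop_eq (arr : List Int) (i : Nat) (h1 : 1 ≤ i) :
    isAllIncreasingLoop arr i = pairsInc (arr.drop (i - 1)) := by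
  rw [isAllIncreasingLoop]
  split
  · next h =>
    have hdrop : arr.drop i = arr.getD i 0 :: arr.drop (i + 1) := by
      rw [List.drop_eq_getElem_cons h, List.getD_eq_getElem _ _ h]
    rw [drop_two_cons arr i h1 h, pairsInc,
        incLoop_eq arr (i + 1) (by omega), show i + 1 - 1 = i from rfl, hdrop]
    simp only [List.getD_eq_getElem?_getD]
    by_cases hc : arr[i]?.getD 0 ≤ arr[i - 1]?.getD 0
    · rw [if_pos hc]; simp [not_lt.mpr hc]
    · rw [if_neg hc]; simp [lt_of_not_ge hc]
  · next h =>
    have : (arr.drop (i - 1)).length ≤ 1 := by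
      rw [List.length_drop]; omega
    rw [(pairs_short _ this).1]
termination_by arr.length - i

theorem decLoop_eq (arr : List Int) (i : Nat) (h1 : 1 ≤ i) :
    isAllDecreasingLoop arr i = pairsDec (arr.drop (i - 1)) := by
  rw [isAllDecreasingLoop]
  split
  · next h =>
    have hdrop : arr.drop i = arr.getD i 0 :: arr.drop (i + 1) := by
      rw [List.drop_eq_getElem_cons h, List.getD_eq_getElem _ _ h]
    rw [drop_two_cons arr i h1 h, pairsDec,
        decLoop_eq arr (i + 1) (by omega), show i + 1 - 1 = i from rfl, hdrop]
    simp only [List.getD_eq_getElem?_getD]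
    by_cases hc : arr[i]?.getD 0 ≥ arr[i - 1]?.getD 0
    · rw [if_pos hc]; simp [not_lt.mpr hc]
    · rw [if_neg hc]; simp [lt_of_not_ge hc]
  · next h =>
    have : (arr.drop (i - 1)).length ≤ 1 := by
      rw [List.length_drop]; omega
    rw [(pairs_short _ this).2.1]
termination_by arr.length - i

theorem diffLoop_eq (arr : List Int) (i : Nat) (u : Bool) (h1 : 1 ≤ i) :
    diffLoop arr i u = (u || !pairsOk (arr.drop (i - 1))) := by
  rw [diffLoop]
  split
  · next h =>
    have hdrop : arr.drop i = arr.getD i 0 :: arr.drop (i + 1) := by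
      rw [List.drop_eq_getElem_cons h, List.getD_eq_getElem _ _ h]
    rw [drop_two_cons arr i h1 h, pairsOk,
        diffLoop_eq arr (i + 1) _ (by omega), show i + 1 - 1 = i from rfl, hdrop]
    simp only [List.getD_eq_getElem?_getD]
    by_cases hc : 1 ≤ |arr[i]?.getD 0 - arr[i - 1]?.getD 0| ∧ |arr[i]?.getD 0 - arr[i - 1]?.getD 0| ≤ 3
    · cases u <;> simp [hc.1, hc.2]
    · rw [not_and_or] at hc
      cases u <;> rcases hc with hc | hc <;> simp [hc]
  · next h =>
    have : (arr.drop (i - 1)).length ≤ 1 := by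
      rw [List.length_drop]; omega
    rw [(pairs_short _ this).2.2]
    cases u <;> rfl
termination_by arr.length - i

-- B's single-pass fold computes the three pair predicates
theorem foldB_eq (l : List Int) (s : Bool × Bool × Bool) :
    (l.zip l.tail).foldl
      (fun (s : Bool × Bool × Bool) (p : Int × Int) =>
        (s.1 && decide (p.2 > p.1),
         s.2.1 && decide (p.2 < p.1),
         s.2.2 && decide (1 ≤ |p.2 - p.1| ∧ |p.2 - p.1| ≤ 3))) s
    = (s.1 && pairsInc l, s.2.1 && pairsDec l, s.2.2 && pairsOk l) := by
  match l with
  | [] => simp [pairsInc, pairsDec, pairsOk]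
  | [a] => simp [pairsInc, pairsDec, pairsOk]
  | a :: b :: t =>
    have ih := foldB_eq (b :: t)
    simp only [List.tail_cons] at ih ⊢
    rw [List.zip_cons_cons, List.foldl_cons, ih]
    simp [pairsInc, pairsDec, pairsOk, Bool.and_assoc]

-- ===== VERDICT (by name: the statement is the Claim_ definition above) =====
theorem are_levels_unsafe_spec : Claim_equal_are_levels_unsafe := by
  intro levels _
  show are_levels_unsafe levels = are_levels_unsafe_alt levels
  rw [are_levels_unsafe, are_levels_unsafe_alt, PySem.List.slice_from_one, foldB_eq]
  rw [is_all_increasing, is_all_decreasing,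
      incLoop_eq levels 1 le_rfl, decLoop_eq levels 1 le_rfl]
  simp only [Nat.sub_self, List.drop_zero]
  by_cases hi : pairsInc levels = true <;> by_cases hd : pairsDec levels = true <;>
    simp [hi, hd, diffLoop_eq levels 1 false le_rfl]
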